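-- pv_equiv track=rewrite | github.com/jbkinney/poolparty-statetracker | poolparty/src/poolparty/utils/style_utils.py | _resolve_styles
-- ===== SOURCE A (Python) =====
-- _BASIC_FG_CODES = {"91", "92", "93", "94", "95", "96", "97", "30"}
--
-- _BASIC_BG_CODES = {"101", "102", "103", "104", "105", "106", "107", "40"}
--
-- def _is_foreground_code(code: str) -> bool:
--     """Check if an ANSI code is a foreground color (basic or true-color)."""
--     return code in _BASIC_FG_CODES or code.startswith("38;2;") or code.startswith("38;5;")
--
-- def _is_background_code(code: str) -> bool:
--     """Check if an ANSI code is a background color (basic or true-color)."""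
--     return code in _BASIC_BG_CODES or code.startswith("48;2;") or code.startswith("48;5;")
--
-- def _resolve_styles(styles_with_priority: dict[str, int]) -> list[str]:
--     """Resolve conflicting styles using priority (higher wins for fg/bg colors)."""
--     # Separate foreground colors, background colors, and other styles
--     fg_codes = {c: p for c, p in styles_with_priority.items() if _is_foreground_code(c)}
--     bg_codes = {c: p for c, p in styles_with_priority.items() if _is_background_code(c)}
--     other_codes = sorted(
--         c for c in styles_with_priority if not _is_foreground_code(c) and not _is_background_code(c)
--     )
--
--     # Build result with FG COLOR first, then BG COLOR, then modifiers
--     # Some terminals (VS Code) need this order to render correctly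
--     result = []
--     if fg_codes:
--         # Pick the foreground color with highest priority (later highlighter wins)
--         winner = max(fg_codes.items(), key=lambda x: x[1])[0]
--         result.append(winner)
--     if bg_codes:
--         # Pick the background color with highest priority (later highlighter wins)
--         winner = max(bg_codes.items(), key=lambda x: x[1])[0]
--         result.append(winner)
--     result.extend(other_codes)  # Add modifiers after colors
--
--     return result
-- ===== SOURCE B (Python) =====
-- _BASIC_FG_CODES = {"91", "92", "93", "94", "95", "96", "97", "30"}
--
-- _BASIC_BG_CODES = {"101", "102", "103", "104", "105", "106", "107", "40"}
--
--
-- def _is_foreground_code(code: str) -> bool: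
--     return code in _BASIC_FG_CODES or code.startswith("38;2;") or code.startswith("38;5;")
--
--
-- def _is_background_code(code: str) -> bool:
--     return code in _BASIC_BG_CODES or code.startswith("48;2;") or code.startswith("48;5;")
--
--
-- def _resolve_styles(styles_with_priority: dict[str, int]) -> list[str]:
--     """Single pass keeping running fg/bg winners; no intermediate dicts, no max()."""
--     best_fg = None  # (code, priority) with highest priority seen so far (first wins ties)
--     best_bg = None
--     others = []
--     for code, prio in styles_with_priority.items():
--         if _is_foreground_code(code):
--             if best_fg is None or prio > best_fg[1]:
--                 best_fg = (code, prio)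
--         if _is_background_code(code):
--             if best_bg is None or prio > best_bg[1]:
--                 best_bg = (code, prio)
--         if not _is_foreground_code(code) and not _is_background_code(code):
--             others.append(code)
--     result = []
--     if best_fg is not None:
--         result.append(best_fg[0])
--     if best_bg is not None:
--         result.append(best_bg[0])
--     result.extend(sorted(others))
--     return result
-- ===== Notes on version B (the rewrite author's own statement) =====
-- stated objective: simpler
-- what changed: Replaces the two intermediate dict comprehensions and the two max() calls with a single pass over the items that maintains running best_fg/best_bg winners (strict > keeps the first maximal, matching max) plus an others list sorted at the end.
import Mathlib
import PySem

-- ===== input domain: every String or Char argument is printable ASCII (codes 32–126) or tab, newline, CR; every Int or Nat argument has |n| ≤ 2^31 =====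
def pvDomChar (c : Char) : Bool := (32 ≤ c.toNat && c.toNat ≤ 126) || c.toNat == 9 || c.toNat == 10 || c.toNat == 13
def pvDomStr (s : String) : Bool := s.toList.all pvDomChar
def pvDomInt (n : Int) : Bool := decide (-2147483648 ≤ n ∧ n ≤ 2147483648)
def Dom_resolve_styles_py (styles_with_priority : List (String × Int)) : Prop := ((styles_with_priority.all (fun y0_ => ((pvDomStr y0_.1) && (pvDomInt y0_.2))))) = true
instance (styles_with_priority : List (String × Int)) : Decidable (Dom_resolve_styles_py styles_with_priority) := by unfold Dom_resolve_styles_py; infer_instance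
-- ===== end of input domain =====

-- B replaces A's two intermediate dicts and two max() calls by one pass keeping running fg/bg winners (simpler, same cost).

-- ===== PORT A =====
def pvBasicFg : List String := ["91", "92", "93", "94", "95", "96", "97", "30"]
def pvBasicBg : List String := ["101", "102", "103", "104", "105", "106", "107", "40"]
def pvIsFg (c : String) : Bool :=
  pvBasicFg.contains c || PySem.Str.startswith c "38;2;" || PySem.Str.startswith c "38;5;"
def pvIsBg (c : String) : Bool :=
  pvBasicBg.contains c || PySem.Str.startswith c "48;2;" || PySem.Str.startswith c "48;5;"

def resolve_styles_py (styles_with_priority : List (String × Int)) : List String :=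
  let fg_codes := styles_with_priority.filter (fun p => pvIsFg p.1)
  let bg_codes := styles_with_priority.filter (fun p => pvIsBg p.1)
  let other_codes :=
    PySem.List.sorted
      ((styles_with_priority.filter (fun p => !pvIsFg p.1 && !pvIsBg p.1)).map (fun p => p.1))
      (fun x => x) false
  let r1 : List String :=
    match PySem.List.max? fg_codes (fun x => x.2) with
    | some winner => [winner.1]
    | none => []
  let r2 : List String :=
    match PySem.List.max? bg_codes (fun x => x.2) with
    | some winner => [winner.1]
    | none => []
  r1 ++ r2 ++ other_codes

-- ===== PORT B =====
-- running winner update: replace only on strictly greater priority (first wins ties)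
def pvUpd (best : Option (String × Int)) (p : String × Int) : Option (String × Int) :=
  match best with
  | none => some p
  | some q => if p.2 > q.2 then some p else some q

def pvStepB (st : Option (String × Int) × Option (String × Int) × List String)
    (p : String × Int) : Option (String × Int) × Option (String × Int) × List String :=
  let bf := if pvIsFg p.1 then pvUpd st.1 p else st.1
  let bb := if pvIsBg p.1 then pvUpd st.2.1 p else st.2.1
  let os := if !pvIsFg p.1 && !pvIsBg p.1 then st.2.2 ++ [p.1] else st.2.2
  (bf, bb, os)

def resolve_styles_py_alt (styles_with_priority : List (String × Int)) : List String :=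
  let st := styles_with_priority.foldl pvStepB (none, none, [])
  let r1 : List String := match st.1 with | some w => [w.1] | none => []
  let r2 : List String := match st.2.1 with | some w => [w.1] | none => []
  r1 ++ r2 ++ PySem.List.sorted st.2.2 (fun x => x) false

-- ===== PRECONDITION & SPEC =====
def Spec_resolve_styles_py (styles_with_priority : List (String × Int)) (out : List String) : Prop := out = resolve_styles_py_alt styles_with_priority
instance (styles_with_priority : List (String × Int)) (out : List String) : Decidable (Spec_resolve_styles_py styles_with_priority out) := by unfold Spec_resolve_styles_py; infer_instance

-- ===== CLAIM (what is proved, stated in full; the proofs are below) =====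
def Claim_equal_resolve_styles_py : Prop := ∀ (styles_with_priority : List (String × Int)), Dom_resolve_styles_py styles_with_priority → Spec_resolve_styles_py styles_with_priority (resolve_styles_py styles_with_priority)

-- ===== LEMMAS AND PROOFS =====

-- B's single fold decomposes into A's three per-category passes.
theorem pvFold_decompose (l : List (String × Int))
    (bf bb : Option (String × Int)) (os : List String) :
    l.foldl pvStepB (bf, bb, os) =
      ((l.filter (fun p => pvIsFg p.1)).foldl pvUpd bf,
       (l.filter (fun p => pvIsBg p.1)).foldl pvUpd bb,
       os ++ (l.filter (fun p => !pvIsFg p.1 && !pvIsBg p.1)).map (fun p => p.1)) := by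
  induction l generalizing bf bb os with
  | nil => simp
  | cons p t ih =>
    simp only [List.foldl_cons, List.filter_cons]
    rw [ih]
    by_cases hf : pvIsFg p.1 <;> by_cases hb : pvIsBg p.1 <;>
      simp [pvStepB, hf, hb]

-- B's running-winner fold IS Python's max with key (first maximal wins).
theorem pvFold_upd_eq_max? (xs : List (String × Int)) :
    xs.foldl pvUpd none = PySem.List.max? xs (fun x => x.2) := by
  simp only [PySem.List.max?]
  congr 1
  funext acc p
  cases acc with
  | none => rfl
  | some q => simp [pvUpd, gt_iff_lt]

-- ===== VERDICT (by name: the statement is the Claim_ definition above) =====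
theorem resolve_styles_py_spec : Claim_equal_resolve_styles_py := by
  intro l _
  show resolve_styles_py l = resolve_styles_py_alt l
  simp only [resolve_styles_py, resolve_styles_py_alt, pvFold_decompose,
    pvFold_upd_eq_max?, List.nil_append]
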